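-- pv_equiv track=rewrite | github.com/nhatanh174/Auto-detecting-bug | Get_date_frequence.py | divide_link
-- ===== SOURCE A (Python) =====
-- def divide_link(input):
--     output = []
--     link = ''
--     for i in range(len(input)):
--         if input[i] == ' ' and input[i - 5:i] == ".java":
--             output.append(link)
--             link = ''
--         else:
--             link += input[i]
--     output.append(link)
--     return output
-- ===== SOURCE B (Python) =====
-- def divide_link(input):
--     # find-and-slice: locate each '.java ' boundary and cut there, instead of per-character accumulation
--     output = []
--     start = 0
--     while True:
--         j = input.find('.java ', start)
--         if j == -1:
--             break
--         output.append(input[start:j + 5])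
--         start = j + 6
--     output.append(input[start:])
--     return output
-- ===== Notes on version B (the rewrite author's own statement) =====
-- stated objective: faster
-- what changed: B replaces the per-character scan with slice-check and link accumulator by a substring-search loop: repeatedly find the next pattern occurrence with str.find and slice out whole segments between cuts.
import Mathlib
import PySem

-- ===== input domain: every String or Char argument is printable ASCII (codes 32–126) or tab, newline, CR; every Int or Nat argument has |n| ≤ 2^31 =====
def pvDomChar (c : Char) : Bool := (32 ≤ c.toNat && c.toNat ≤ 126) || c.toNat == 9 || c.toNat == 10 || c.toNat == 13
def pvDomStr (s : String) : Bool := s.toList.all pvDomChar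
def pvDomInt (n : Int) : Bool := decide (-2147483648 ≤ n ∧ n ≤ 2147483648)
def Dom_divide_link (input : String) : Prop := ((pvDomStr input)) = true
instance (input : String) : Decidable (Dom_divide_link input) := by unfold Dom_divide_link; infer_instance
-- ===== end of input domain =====

-- B replaces A's per-character scan (slice check + link accumulator) by a find-and-slice loop
-- over '.java ' occurrences; the return values are proved equal on all domain inputs.


-- ===== PORT A =====
-- loop body: if input[i] == ' ' and input[i-5:i] == ".java": append link, reset; else link += input[i]
def pvStepA (s : List Char) (st : List String × List Char) (i : Int) : List String × List Char :=
  if PySem.List.pyGetD s i ' ' = ' ' ∧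
      PySem.List.slice s (some (i - 5)) (some i) = ".java".toList then
    (st.1 ++ [String.ofList st.2], ([] : List Char))
  else
    (st.1, st.2 ++ [PySem.List.pyGetD s i ' '])

def divide_link (input : String) : List String :=
  let s := input.toList
  let st := (PySem.List.pyRange 0 (s.length : Int) 1).foldl (pvStepA s) ([], [])
  st.1 ++ [String.ofList st.2]

-- ===== PORT B =====
-- termination helper for the find loop: a start past the end finds nothing
theorem pvFindFrom_gt_len (s sub : List Char) (start : Nat) (h : s.length < start) :
    PySem.Chars.findFrom s sub (start : Int) none = -1 := by
  simp only [PySem.Chars.findFrom]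
  have h1 : ¬ ((start : Int) < 0) := by omega
  have h2 : (s.length : Int) < (start : Int) := by exact_mod_cast h
  simp [h1, h2]

-- while True: j = input.find('.java ', start); if j == -1: break; append input[start:j+5]; start = j+6
def divide_link_alt_loop (s : List Char) (start : Nat) : List String :=
  let j := PySem.Chars.findFrom s ".java ".toList (start : Int) none
  if h : j = -1 then
    [String.ofList (PySem.List.slice s (some (start : Int)) none)]
  else
    String.ofList (PySem.List.slice s (some (start : Int)) (some (j + 5))) ::
      divide_link_alt_loop s (j + 6).toNat
termination_by s.length + 1 - start
decreasing_by
  have hs : start ≤ s.length := by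
    by_contra hs
    exact h (pvFindFrom_gt_len s _ start (Nat.lt_of_not_le hs))
  obtain ⟨hle, hsp, -⟩ := PySem.Chars.findFrom_natCast_spec s ".java ".toList start hs h
  have h6 : (".java ".toList).length = 6 := by decide
  have hlen := hsp.length_le
  rw [List.length_drop, h6] at hlen
  omega

def divide_link_alt (input : String) : List String :=
  divide_link_alt_loop input.toList 0

-- ===== PRECONDITION & SPEC =====
def Spec_divide_link (input : String) (out : List String) : Prop := out = divide_link_alt input
instance (input : String) (out : List String) : Decidable (Spec_divide_link input out) := by unfold Spec_divide_link; infer_instance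

-- ===== CLAIM (what is proved, stated in full; the proofs are below) =====
def Claim_equal_divide_link : Prop := ∀ (input : String), Dom_divide_link input → Spec_divide_link input (divide_link input)

-- ===== LEMMAS AND PROOFS =====

-- an occurrence of ".java " at position j forces j + 6 ≤ |s|
theorem pvOccLen {s : List Char} {j : Nat} (h : ".java ".toList <+: List.drop j s) :
    j + 6 ≤ s.length := by
  have h6 : (".java ".toList).length = 6 := by decide
  have hlen := h.length_le
  rw [List.length_drop, h6] at hlen
  omega

theorem pvOccGet {s : List Char} {j : Nat} (h : ".java ".toList <+: List.drop j s)
    (k : Nat) (hk : k < 6) : s[j + k]? = (".java ".toList)[k]? := by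
  obtain ⟨t, ht⟩ := h
  rw [← List.getElem?_drop, ← ht, List.getElem?_append_left (by simpa using hk)]

-- occurrences of ".java " cannot overlap
theorem pvNoOverlap {s : List Char} {j j' : Nat}
    (h : ".java ".toList <+: List.drop j s) (h' : ".java ".toList <+: List.drop j' s)
    (hlt : j < j') : j + 6 ≤ j' := by
  by_contra hc
  have hsp := pvOccGet h 5 (by omega)
  have h2 := pvOccGet h' (j + 5 - j') (by omega)
  rw [show j' + (j + 5 - j') = j + 5 by omega] at h2
  rw [hsp] at h2
  set k := j + 5 - j' with hk
  have hk4 : k ≤ 4 := by omega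
  interval_cases k <;> exact absurd h2 (by decide)

-- A's per-position test, characterised: space preceded by ".java" = an occurrence at k-5
theorem pvCondIff (s : List Char) (k : Nat) (hk : k < s.length) :
    (PySem.List.pyGetD s (k : Int) ' ' = ' ' ∧
      PySem.List.slice s (some ((k : Int) - 5)) (some (k : Int)) = ".java".toList)
    ↔ 5 ≤ k ∧ ".java ".toList <+: List.drop (k - 5) s := by
  have hget : PySem.List.pyGetD s (k : Int) ' ' = s[k] := by
    rw [PySem.List.pyGetD_natCast]
    exact List.getD_eq_getElem s ' ' hk
  by_cases h5 : 5 ≤ k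
  · have e1 : (k : Int) - 5 = ((k - 5 : Nat) : Int) := by omega
    rw [e1, PySem.List.slice_natCast, show k - (k - 5) = 5 by omega]
    have hd : (List.drop (k - 5) s)[5]? = some s[k] := by
      rw [List.getElem?_drop, show k - 5 + 5 = k by omega]
      exact List.getElem?_eq_getElem hk
    have htake : List.take 6 (List.drop (k - 5) s)
        = List.take 5 (List.drop (k - 5) s) ++ [s[k]] := by
      rw [show (6 : Nat) = 5 + 1 by rfl, List.take_add_one, hd]
      rfl
    have hpfx : (".java ".toList <+: List.drop (k - 5) s)
        ↔ ".java ".toList = List.take 6 (List.drop (k - 5) s) := by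
      rw [List.prefix_iff_eq_take]
      have : (".java ".toList).length = 6 := by decide
      rw [this]
    constructor
    · rintro ⟨hsp, hsl⟩
      refine ⟨h5, hpfx.mpr ?_⟩
      have hk' : s[k] = ' ' := by rw [← hget, hsp]
      rw [htake, hsl, hk']
      decide
    · rintro ⟨-, hocc⟩
      have := hpfx.mp hocc
      rw [htake] at this
      have hlen5 : (List.take 5 (List.drop (k - 5) s)).length = 5 := by
        rw [List.length_take, List.length_drop]
        omega
      have hinj := List.append_inj (show ".java".toList ++ [' ']
          = List.take 5 (List.drop (k - 5) s) ++ [s[k]] from this) (by rw [hlen5]; rfl)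
      refine ⟨by rw [hget]; exact (List.singleton_inj.mp hinj.2).symm, hinj.1.symm⟩
  · constructor
    · rintro ⟨-, hsl⟩
      exfalso
      have hlen := congrArg List.length hsl
      rw [PySem.List.length_slice] at hlen
      rw [show (k : Int) - 5 = -((5 - k : Nat) : Int) by omega,
        PySem.List.clampIdx_neg_natCast s.length (5 - k) (by omega),
        PySem.List.clampIdx_natCast] at hlen
      have : (".java".toList).length = 5 := by decide
      rw [this] at hlen
      omega
    · rintro ⟨h, -⟩
      exact absurd h h5

-- a failed find from p means no occurrence at or after p
theorem pvFindNone (s : List Char) (p : Nat) (hp : p ≤ s.length)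
    (h : PySem.Chars.findFrom s ".java ".toList (p : Int) none = -1) :
    ∀ j : Nat, p ≤ j → ¬ ".java ".toList <+: List.drop j s := by
  intro j hpj hocc
  rw [PySem.Chars.findFrom_natCast s _ p hp] at h
  have hinf : ".java ".toList <:+: List.drop p s := by
    have hd : List.drop j s = List.drop (j - p) (List.drop p s) := by
      rw [List.drop_drop]
      congr 1
      omega
    rw [hd] at hocc
    exact hocc.isInfix.trans (List.drop_suffix _ _).isInfix
  by_cases hc : PySem.Chars.find (List.drop p s) ".java ".toList = -1
  · exact (PySem.Chars.find_eq_neg_one_iff _ _).mp hc hinf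
  · rw [if_neg hc] at h
    have := (PySem.Chars.find_nonneg_iff (List.drop p s) ".java ".toList).mpr hinf
    omega

-- a stretch with no cut just accumulates the characters into link
theorem pvFoldNC (s : List Char) :
    ∀ (d p : Nat) (o : List String) (l : List Char), p + d ≤ s.length →
    (∀ k : Nat, p ≤ k → k < p + d →
      ¬ (5 ≤ k ∧ ".java ".toList <+: List.drop (k - 5) s)) →
    (PySem.List.pyRange (p : Int) ((p + d : Nat) : Int) 1).foldl (pvStepA s) (o, l)
      = (o, l ++ List.take d (List.drop p s)) := by
  intro d
  induction d with
  | zero =>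
    intro p o l _ _
    rw [show ((p + 0 : Nat) : Int) = (p : Int) by omega,
      PySem.List.pyRange_one_eq_nil (le_refl _)]
    simp
  | succ m ih =>
    intro p o l hle hnc
    rw [PySem.List.pyRange_one_cons (by omega : (p : Int) < ((p + (m + 1) : Nat) : Int)),
      List.foldl_cons]
    have hplt : p < s.length := by omega
    have hstep : pvStepA s (o, l) (p : Int) = (o, l ++ [s[p]]) := by
      rw [pvStepA, if_neg (fun hc => hnc p le_rfl (by omega) ((pvCondIff s p hplt).mp hc))]
      rw [PySem.List.pyGetD_natCast, List.getD_eq_getElem s ' ' hplt]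
    rw [hstep, show ((p : Int) + 1) = ((p + 1 : Nat) : Int) by omega,
      show ((p + (m + 1) : Nat) : Int) = ((p + 1 + m : Nat) : Int) by omega,
      ih (p + 1) o (l ++ [s[p]]) (by omega)
        (fun k hk1 hk2 => hnc k (by omega) (by omega))]
    rw [show List.take (m + 1) (List.drop p s) = s[p] :: List.take m (List.drop (p + 1) s) by
      rw [List.drop_eq_getElem_cons hplt, List.take_succ_cons]]
    simp

def pvMerge (l : List Char) : List String → List String
  | [] => [String.ofList l]
  | x :: xs => String.ofList (l ++ x.toList) :: xs

theorem pvLoopNeNil (s : List Char) (q : Nat) : divide_link_alt_loop s q ≠ [] := by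
  rw [divide_link_alt_loop]
  split <;> simp

theorem pvMergeNil {lst : List String} (h : lst ≠ []) : pvMerge [] lst = lst := by
  cases lst with
  | nil => exact absurd rfl h
  | cons x xs => simp [pvMerge]

-- main invariant: from a position no occurrence straddles, A's fold produces B's segments
theorem pvMain (s : List Char) :
    ∀ (fuel p : Nat) (o : List String) (l : List Char),
    s.length ≤ p + fuel → p ≤ s.length →
    (∀ j : Nat, ".java ".toList <+: List.drop j s → j < p → j + 6 ≤ p) →
    ((((PySem.List.pyRange (p : Int) (s.length : Int) 1).foldl (pvStepA s) (o, l)).1)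
      ++ [String.ofList (((PySem.List.pyRange (p : Int) (s.length : Int) 1).foldl (pvStepA s) (o, l)).2)])
    = o ++ pvMerge l (divide_link_alt_loop s p) := by
  intro fuel
  induction fuel with
  | zero =>
    intro p o l hfuel hp _
    have hpn : p = s.length := by omega
    subst hpn
    rw [PySem.List.pyRange_one_eq_nil (le_refl _)]
    rw [divide_link_alt_loop]
    have hj : PySem.Chars.findFrom s ".java ".toList (s.length : Int) none = -1 := by
      by_contra hj
      obtain ⟨hle, hocc, -⟩ :=
        PySem.Chars.findFrom_natCast_spec s ".java ".toList s.length le_rfl hj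
      have := pvOccLen hocc
      omega
    rw [dif_pos hj]
    simp [pvMerge, PySem.List.slice_from_natCast]
  | succ m ih =>
    intro p o l hfuel hp hfresh
    rw [divide_link_alt_loop]
    by_cases hj : PySem.Chars.findFrom s ".java ".toList (p : Int) none = -1
    · rw [dif_pos hj]
      have hno := pvFindNone s p hp hj
      have hnc : ∀ k : Nat, p ≤ k → k < p + (s.length - p) →
          ¬ (5 ≤ k ∧ ".java ".toList <+: List.drop (k - 5) s) := by
        rintro k hk1 hk2 ⟨h5, hocc⟩
        by_cases hkp : p ≤ k - 5
        · exact hno _ hkp hocc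
        · have := hfresh (k - 5) hocc (by omega)
          omega
      have hfold := pvFoldNC s (s.length - p) p o l (by omega) hnc
      rw [show ((p + (s.length - p) : Nat) : Int) = (s.length : Int) by omega] at hfold
      rw [hfold]
      have htk : List.take (s.length - p) (List.drop p s) = List.drop p s :=
        List.take_of_length_le (by rw [List.length_drop])
      rw [htk]
      simp [pvMerge, PySem.List.slice_from_natCast]
    · rw [dif_neg hj]
      obtain ⟨hple, hocc, hmin⟩ :=
        PySem.Chars.findFrom_natCast_spec s ".java ".toList p hp hj
      set j := PySem.Chars.findFrom s ".java ".toList (p : Int) none with hjdef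
      have hj0 : (0 : Int) ≤ j := le_trans (by omega) hple
      set jn := j.toNat with hjn
      have hjcast : j = (jn : Int) := by omega
      have hlen : jn + 6 ≤ s.length := pvOccLen hocc
      have hpjn : p ≤ jn := by omega
      -- split the range at the cut position jn+5 and at jn+6
      rw [PySem.List.pyRange_one_append (p : Int) ((jn + 5 : Nat) : Int) (s.length : Int)
        (by omega) (by omega), List.foldl_append,
        PySem.List.pyRange_one_append ((jn + 5 : Nat) : Int) ((jn + 6 : Nat) : Int)
          (s.length : Int) (by omega) (by omega), List.foldl_append]
      -- stretch [p, jn+5): no cut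
      have hnc : ∀ k : Nat, p ≤ k → k < p + (jn + 5 - p) →
          ¬ (5 ≤ k ∧ ".java ".toList <+: List.drop (k - 5) s) := by
        rintro k hk1 hk2 ⟨h5, hocc'⟩
        by_cases hkp : p ≤ k - 5
        · exact hmin (k - 5) hkp (by omega) hocc'
        · have := hfresh (k - 5) hocc' (by omega)
          omega
      have hfold := pvFoldNC s (jn + 5 - p) p o l (by omega) hnc
      rw [show ((p + (jn + 5 - p) : Nat) : Int) = ((jn + 5 : Nat) : Int) by omega] at hfold
      rw [hfold]
      -- the single cut position jn+5
      have hsing : PySem.List.pyRange ((jn + 5 : Nat) : Int) ((jn + 6 : Nat) : Int) 1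
          = [((jn + 5 : Nat) : Int)] := by
        rw [show ((jn + 6 : Nat) : Int) = ((jn + 5 : Nat) : Int) + 1 by omega]
        exact PySem.List.pyRange_one_singleton _
      rw [hsing, List.foldl_cons, List.foldl_nil]
      have hcut : pvStepA s (o, l ++ List.take (jn + 5 - p) (List.drop p s))
            ((jn + 5 : Nat) : Int)
          = (o ++ [String.ofList (l ++ List.take (jn + 5 - p) (List.drop p s))], []) := by
        rw [pvStepA, if_pos ((pvCondIff s (jn + 5) (by omega)).mpr
          ⟨by omega, by rw [show jn + 5 - 5 = jn by omega]; exact hocc⟩)]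
      rw [hcut]
      -- the tail [jn+6, n) via the induction hypothesis
      have hfresh' : ∀ j' : Nat, ".java ".toList <+: List.drop j' s → j' < jn + 6 →
          j' + 6 ≤ jn + 6 := by
        intro j' hocc' hlt'
        by_contra hcon
        exact absurd (pvNoOverlap hocc hocc' (by omega)) (by omega)
      have hih := ih (jn + 6) (o ++ [String.ofList (l ++ List.take (jn + 5 - p) (List.drop p s))])
        [] (by omega) (by omega) hfresh'
      rw [hih]
      have hj6 : (j + 6).toNat = jn + 6 := by omega
      rw [hj6, pvMergeNil (pvLoopNeNil s (jn + 6)),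
        show j + 5 = ((jn + 5 : Nat) : Int) by omega, PySem.List.slice_natCast]
      simp [pvMerge]

-- ===== VERDICT (by name: the statement is the Claim_ definition above) =====
theorem divide_link_spec : Claim_equal_divide_link := by
  intro input _
  unfold Spec_divide_link divide_link divide_link_alt
  have h := pvMain input.toList input.toList.length 0 [] [] (by omega) (by omega)
    (by intro j _ h; omega)
  rw [show ((0 : Nat) : Int) = (0 : Int) by rfl] at h
  rw [h, pvMergeNil (pvLoopNeNil input.toList 0)]
  simp
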